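-- pv_equiv track=rewrite | github.com/pmills/leo-editor | leo/core/leoFind.py | makeRegexSubs
-- ===== SOURCE A (Python) =====
-- def makeRegexSubs(s, groups):
--     r'''
--     Carefully substitute group[i-1] for \i strings in s.
--     The group strings may contain \i strings: they are *not* substituted.
--     '''
--     digits = '123456789'
--     result = []; n = len(s)
--     i = j = 0 # s[i:j] is the text between \i markers.
--     while j < n:
--         k = s.find('\\', j)
--         if k == -1 or k + 1 >= n:
--             break
--         j = k + 1; ch = s[j]
--         if ch in digits:
--             j += 1
--             result.append(s[i: k]) # Append up to \i
--             i = j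
--             gn = int(ch) - 1
--             if gn < len(groups):
--                 result.append(groups[gn]) # Append groups[i-1]
--             else:
--                 result.append('\\%s' % ch) # Append raw '\i'
--     result.append(s[i:])
--     return ''.join(result)
-- ===== SOURCE B (Python) =====
-- import re
--
-- def makeRegexSubs(s, groups):
--     r'''
--     Carefully substitute group[i-1] for \i strings in s.
--     The group strings may contain \i strings: they are *not* substituted.
--     '''
--     def repl(m):
--         gn = int(m.group(1)) - 1
--         # Function-form replacement: the returned text is inserted literally,
--         # so backslashes inside group strings are never re-substituted.
--         return groups[gn] if gn < len(groups) else '\\' + m.group(1)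
--     return re.sub(r'\\([1-9])', repl, s)
-- ===== Notes on version B (the rewrite author's own statement) =====
-- stated objective: idiomatic
-- what changed: Replaced A's explicit find/slice index loop (manual cursor bookkeeping i/j/k and a list of segments) with a single re.sub call using a callback replacement, letting the regex engine do the scanning.
import Mathlib
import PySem

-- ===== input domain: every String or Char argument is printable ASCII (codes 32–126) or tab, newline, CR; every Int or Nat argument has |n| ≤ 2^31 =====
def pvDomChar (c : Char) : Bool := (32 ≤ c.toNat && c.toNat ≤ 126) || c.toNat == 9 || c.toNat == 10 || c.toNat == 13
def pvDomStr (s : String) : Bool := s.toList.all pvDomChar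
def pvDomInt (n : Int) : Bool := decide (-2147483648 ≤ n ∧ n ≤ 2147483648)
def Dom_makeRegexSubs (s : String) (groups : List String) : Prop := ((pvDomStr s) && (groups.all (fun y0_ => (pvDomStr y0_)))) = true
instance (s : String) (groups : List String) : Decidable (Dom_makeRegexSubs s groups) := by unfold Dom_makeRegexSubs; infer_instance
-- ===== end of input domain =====

-- B replaces A's explicit find/slice cursor loop with a single regex-engine
-- substitution (re.sub with a callback replacement); same return value.


-- ===== PORT A =====
-- the while loop of A; state (i, j, result) exactly as in the Python, pieces kept as List Char
def makeRegexSubsLoop (s : List Char) (groups : List String) (i j : Nat)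
    (result : List (List Char)) : List (List Char) :=
  if hj : j < s.length then
    let k := PySem.Chars.findFrom s ['\\'] (j : Int) none      -- k = s.find('\\', j)
    if hk : k = -1 ∨ k + 1 ≥ (s.length : Int) then
      result ++ [PySem.List.slice s (some (i : Int)) none]      -- break; then result.append(s[i:])
    else
      let j' := k.toNat + 1                                     -- j = k + 1
      let ch := (PySem.List.pyGet? s (j' : Int)).getD ' '       -- ch = s[j]; in range since k + 1 < n
      if ch ∈ ("123456789".toList) then                         -- ch in digits
        let result' := result ++ [PySem.List.slice s (some (i : Int)) (some k)]  -- append s[i:k]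
        let gn := ch.toNat - 49                                 -- gn = int(ch) - 1 (ch is a digit)
        let result'' :=
          if gn < groups.length then
            result' ++ [((PySem.List.pyGet? groups (gn : Int)).getD "").toList]  -- groups[gn], in range
          else
            result' ++ [['\\', ch]]                             -- '\%s' % ch
        makeRegexSubsLoop s groups (j' + 1) (j' + 1) result''
      else
        makeRegexSubsLoop s groups i j' result
  else
    result ++ [PySem.List.slice s (some (i : Int)) none]        -- result.append(s[i:])
termination_by s.length - j
decreasing_by
  all_goals
    rcases not_or.mp hk with ⟨hk1, -⟩
    have hspec := PySem.Chars.findFrom_natCast_spec s ['\\'] j (by omega) hk1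
    have := hspec.1
    omega

def makeRegexSubs (s : String) (groups : List String) : String :=
  String.ofList (PySem.Chars.join [] (makeRegexSubsLoop s.toList groups 0 0 []))  -- ''.join(result)

-- ===== PORT B =====
-- hand port of re.sub(r'\\([1-9])', repl, s) with callback repl (exact for this fixed
-- pattern): the engine scans left to right; at each position it tries to match a
-- backslash followed by a digit 1-9; on a match it inserts repl's return value
-- LITERALLY and resumes after the match, otherwise it copies one character on.
def subB (groups : List String) : List Char → List Char
  | [] => []
  | c :: rest =>
    if c = '\\' then
      match rest with
      | [] => ['\\']                                            -- lone trailing backslash: no match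
      | d :: rest2 =>
        if '1' ≤ d ∧ d ≤ '9' then                               -- ([1-9]) matched d
          (if d.toNat - 49 < groups.length then (groups.getD (d.toNat - 49) "").toList
           else ['\\', d]) ++ subB groups rest2                 -- repl(m), inserted literally
        else '\\' :: subB groups (d :: rest2)                   -- no match here; engine advances
    else c :: subB groups rest

def makeRegexSubs_alt (s : String) (groups : List String) : String :=
  String.ofList (subB groups s.toList)

-- ===== PRECONDITION & SPEC =====
def Spec_makeRegexSubs (s : String) (groups : List String) (out : String) : Prop := out = makeRegexSubs_alt s groups
instance (s : String) (groups : List String) (out : String) : Decidable (Spec_makeRegexSubs s groups out) := by unfold Spec_makeRegexSubs; infer_instance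

-- ===== CLAIM (what is proved, stated in full; the proofs are below) =====
def Claim_equal_makeRegexSubs : Prop := ∀ (s : String) (groups : List String), Dom_makeRegexSubs s groups → Spec_makeRegexSubs s groups (makeRegexSubs s groups)

-- ===== LEMMAS AND PROOFS =====

theorem char_le_toNat (a b : Char) : (a ≤ b) ↔ a.toNat ≤ b.toNat := by
  simp [Char.le_def, UInt32.le_iff_toNat_le]

theorem char_eq_toNat (a b : Char) : a = b ↔ a.toNat = b.toNat :=
  ⟨fun h => h ▸ rfl, fun h => Char.ext (UInt32.toNat_inj.mp h)⟩

-- A's membership test 'ch in digits' agrees with B's character class [1-9]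
theorem dig_iff (c : Char) : (c ∈ "123456789".toList) ↔ ('1' ≤ c ∧ c ≤ '9') := by
  show c ∈ ['1','2','3','4','5','6','7','8','9'] ↔ _
  simp only [List.mem_cons, List.not_mem_nil, or_false, char_eq_toNat, char_le_toNat]
  have h1 : '1'.toNat = 49 := rfl
  have h2 : '2'.toNat = 50 := rfl
  have h3 : '3'.toNat = 51 := rfl
  have h4 : '4'.toNat = 52 := rfl
  have h5 : '5'.toNat = 53 := rfl
  have h6 : '6'.toNat = 54 := rfl
  have h7 : '7'.toNat = 55 := rfl
  have h8 : '8'.toNat = 56 := rfl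
  have h9 : '9'.toNat = 57 := rfl
  omega

theorem subB_nil (groups : List String) : subB groups [] = [] := rfl

theorem subB_cons_ne (groups : List String) (c : Char) (rest : List Char) (h : c ≠ '\\') :
    subB groups (c :: rest) = c :: subB groups rest := by
  rw [subB.eq_def]; simp [h]

theorem subB_bs_one (groups : List String) : subB groups ['\\'] = ['\\'] := by
  rw [subB.eq_def]; simp

theorem subB_bs_digit (groups : List String) (d : Char) (rest2 : List Char)
    (h : '1' ≤ d ∧ d ≤ '9') :
    subB groups ('\\' :: d :: rest2) =
      (if d.toNat - 49 < groups.length then (groups.getD (d.toNat - 49) "").toList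
       else ['\\', d]) ++ subB groups rest2 := by
  rw [subB.eq_def]; simp [h]

theorem subB_bs_nondigit (groups : List String) (d : Char) (rest2 : List Char)
    (h : ¬('1' ≤ d ∧ d ≤ '9')) :
    subB groups ('\\' :: d :: rest2) = '\\' :: subB groups (d :: rest2) := by
  rw [subB.eq_def]; simp [h]

-- a match-free stretch is copied literally by the engine
theorem subB_skip (groups : List String) :
    ∀ (m : Nat) (cs : List Char), (∀ p < m, cs[p]? ≠ some '\\') →
      subB groups cs = cs.take m ++ subB groups (cs.drop m) := by
  intro m
  induction m with
  | zero => simp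
  | succ m ih =>
    intro cs h
    cases cs with
    | nil => simp [subB_nil]
    | cons c rest =>
      have hc : c ≠ '\\' := by
        intro hc; exact h 0 (by omega) (by simp [hc])
      rw [subB_cons_ne groups c rest hc,
          ih rest (fun p hp => by have := h (p + 1) (by omega); simpa using this)]
      simp

theorem subB_id (groups : List String) (cs : List Char) (h : '\\' ∉ cs) :
    subB groups cs = cs := by
  rw [subB_skip groups cs.length cs (fun p _ hc => h (List.mem_of_getElem? hc))]
  simp [subB_nil]

theorem singleton_prefix_iff (a : Char) (l : List Char) : [a] <+: l ↔ l[0]? = some a := by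
  cases l with
  | nil => simp
  | cons x t => simp [List.prefix_cons_iff, eq_comm]

-- loop invariant: s[i:j] is a match-free stretch already known to be copied literally
theorem loop_eq (s : List Char) (groups : List String) (i j : Nat) (result : List (List Char))
    (hij : i ≤ j) (hj : j ≤ s.length)
    (H : subB groups (s.drop i) = (s.drop i).take (j - i) ++ subB groups (s.drop j)) :
    (makeRegexSubsLoop s groups i j result).flatten
      = result.flatten ++ subB groups (s.drop i) := by
  rw [makeRegexSubsLoop]
  by_cases hjlt : j < s.length
  · simp only [dif_pos hjlt]
    by_cases hk : PySem.Chars.findFrom s ['\\'] (j : Int) none = -1 ∨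
        PySem.Chars.findFrom s ['\\'] (j : Int) none + 1 ≥ (s.length : Int)
    · simp only [dif_pos hk]
      -- break: no further match; subB copies s[j:] literally
      have hsub : subB groups (s.drop j) = s.drop j := by
        rcases hk with hk | hk
        · have := (PySem.Chars.findFrom_natCast_eq_neg_one_iff s ['\\'] j hj).mp hk
          exact subB_id groups _ (fun hm => this ((List.singleton_infix_iff _ _).mpr hm))
        · have hne : PySem.Chars.findFrom s ['\\'] (j : Int) none ≠ -1 := by
            intro h0; rw [h0] at hk; omega
          have hspec := PySem.Chars.findFrom_natCast_spec s ['\\'] j hj hne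
          set k := PySem.Chars.findFrom s ['\\'] (j : Int) none with hkdef
          obtain ⟨hjk, hpre, hmin⟩ := hspec
          obtain ⟨t, ht⟩ := hpre
          have hKlt : k.toNat < s.length := by
            by_contra hge
            rw [List.drop_eq_nil_of_le (by omega)] at ht
            simp at ht
          have htail : t = s.drop (k.toNat + 1) := by
            rw [← List.tail_drop, ← ht]; rfl
          have htnil : t = [] := by
            rw [htail]; exact List.drop_eq_nil_of_le (by omega)
          have hdropK : s.drop k.toNat = ['\\'] := by
            rw [← ht, htnil]; rfl
          have hmidfree : ∀ p < k.toNat - j, (s.drop j)[p]? ≠ some '\\' := by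
            intro p hp hc
            have hpc : [('\\' : Char)] <+: s.drop (j + p) := by
              rw [singleton_prefix_iff, List.getElem?_drop]
              rw [List.getElem?_drop] at hc
              simpa using hc
            exact hmin (j + p) (by omega) (by omega) hpc
          rw [subB_skip groups (k.toNat - j) (s.drop j) hmidfree, List.drop_drop,
              show j + (k.toNat - j) = k.toNat by omega, hdropK, subB_bs_one]
          conv_rhs => rw [← List.take_append_drop (k.toNat - j) (s.drop j)]
          rw [List.drop_drop, show j + (k.toNat - j) = k.toNat by omega, hdropK]
      rw [PySem.List.slice_from_natCast, H, hsub]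
      have hglue : (s.drop i).take (j - i) ++ s.drop j = s.drop i := by
        conv_rhs => rw [← List.take_append_drop (j - i) (s.drop i)]
        rw [List.drop_drop, show i + (j - i) = j by omega]
      simp [hglue]
    · simp only [dif_neg hk]
      rcases not_or.mp hk with ⟨hk1, hk2⟩
      have hlt := lt_of_not_ge hk2
      have hspec := PySem.Chars.findFrom_natCast_spec s ['\\'] j hj hk1
      set k := PySem.Chars.findFrom s ['\\'] (j : Int) none with hkdef
      obtain ⟨hjk, hpre, hmin⟩ := hspec
      have hK1lt : k.toNat + 1 < s.length := by omega
      obtain ⟨t, ht⟩ := hpre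
      have htail : t = s.drop (k.toNat + 1) := by
        rw [← List.tail_drop, ← ht]; rfl
      have hdropK : s.drop k.toNat = '\\' :: s.drop (k.toNat + 1) := by
        rw [← ht, htail]; rfl
      have hlen1 : 0 < (s.drop (k.toNat + 1)).length := by
        rw [List.length_drop]; omega
      obtain ⟨c, rest2, hdropK1⟩ : ∃ c rest2, s.drop (k.toNat + 1) = c :: rest2 := by
        cases hK : s.drop (k.toNat + 1) with
        | nil => rw [hK] at hlen1; simp at hlen1
        | cons a b => exact ⟨a, b, rfl⟩
      have hch : (PySem.List.pyGet? s ((k.toNat + 1 : Nat) : Int)).getD ' ' = c := by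
        have h0 : (s.drop (k.toNat + 1))[0]? = s[k.toNat + 1]? := by
          exact List.getElem?_drop (xs := s) (i := k.toNat + 1) (j := 0)
        rw [PySem.List.pyGet?_natCast, ← h0, hdropK1]
        simp
      have hrest2 : rest2 = s.drop (k.toNat + 2) := by
        rw [← List.tail_drop, hdropK1]; rfl
      have hmidfree : ∀ p < k.toNat - j, (s.drop j)[p]? ≠ some '\\' := by
        intro p hp hc
        have hpc : [('\\' : Char)] <+: s.drop (j + p) := by
          rw [singleton_prefix_iff, List.getElem?_drop]
          rw [List.getElem?_drop] at hc
          simpa using hc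
        exact hmin (j + p) (by omega) (by omega) hpc
      have hmid : subB groups (s.drop j)
          = (s.drop j).take (k.toNat - j) ++ subB groups (s.drop k.toNat) := by
        rw [subB_skip groups (k.toNat - j) (s.drop j) hmidfree, List.drop_drop,
            show j + (k.toNat - j) = k.toNat by omega]
      have htake_ji : (s.drop i).take (j - i) ++ (s.drop j).take (k.toNat - j)
          = (s.drop i).take (k.toNat - i) := by
        rw [show k.toNat - i = (j - i) + (k.toNat - j) by omega, List.take_add]
        congr 2
        rw [List.drop_drop, show i + (j - i) = j by omega]
      have hkcast : ((k.toNat : Nat) : Int) = k := Int.toNat_of_nonneg (by omega)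
      by_cases hd : (PySem.List.pyGet? s (((k.toNat + 1 : Nat) : Int))).getD ' ' ∈ "123456789".toList
      · simp only [if_pos hd]
        rw [hch] at hd
        have hcd := (dig_iff c).mp hd
        have hslice : PySem.List.slice s (some (i : Int)) (some k)
            = (s.drop i).take (k.toNat - i) := by
          conv_lhs => rw [← hkcast]
          rw [PySem.List.slice_natCast]
        rw [loop_eq s groups (k.toNat + 1 + 1) (k.toNat + 1 + 1) _ (le_refl _) (by omega) (by simp)]
        rw [hch, hslice, H, hmid, hdropK, hdropK1, subB_bs_digit groups c rest2 hcd, hrest2,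
            show k.toNat + 1 + 1 = k.toNat + 2 by omega, ← htake_ji]
        split_ifs with hgn
        · simp [PySem.List.pyGet?_natCast, List.getD_eq_getElem?_getD, List.append_assoc]
        · simp [List.append_assoc]
      · simp only [if_neg hd]
        rw [hch] at hd
        have hcd : ¬('1' ≤ c ∧ c ≤ '9') := fun h => hd ((dig_iff c).mpr h)
        have H' : subB groups (s.drop i)
            = (s.drop i).take (k.toNat + 1 - i) ++ subB groups (s.drop (k.toNat + 1)) := by
          rw [H, hmid, hdropK, hdropK1, subB_bs_nondigit groups c rest2 hcd, ← hdropK1,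
              show k.toNat + 1 - i = (k.toNat - i) + 1 by omega, List.take_add, ← htake_ji,
              List.drop_drop, show i + (k.toNat - i) = k.toNat by omega, hdropK]
          simp
        exact loop_eq s groups i (k.toNat + 1) result (by omega) (by omega) H'
  · simp only [dif_neg hjlt]
    have hje : j = s.length := by omega
    have hsub : subB groups (s.drop i) = s.drop i := by
      have htk : (s.drop i).take (s.length - i) = s.drop i :=
        List.take_of_length_le (by simp [List.length_drop])
      rw [H, hje]
      simp [htk, subB_nil]
    rw [PySem.List.slice_from_natCast]
    simp [hsub]
termination_by s.length - j
decreasing_by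
  all_goals omega

theorem join_nil_flatten (l : List (List Char)) : PySem.Chars.join [] l = l.flatten := by
  induction l with
  | nil => simp [PySem.Chars.join_nil]
  | cons a r ih =>
    cases r with
    | nil => simp [PySem.Chars.join_singleton]
    | cons b r2 =>
      rw [PySem.Chars.join_cons_cons, ih]
      simp

-- ===== VERDICT (by name: the statement is the Claim_ definition above) =====
theorem makeRegexSubs_spec : Claim_equal_makeRegexSubs := by
  intro s groups _
  unfold Spec_makeRegexSubs makeRegexSubs makeRegexSubs_alt
  rw [join_nil_flatten,
      loop_eq s.toList groups 0 0 [] (le_refl _) (by omega) (by simp)]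
  simp
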